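-- pv_equiv track=rewrite | github.com/besasam/advent-of-code | 2015/25/25.py | get_code_by_position
-- ===== SOURCE A (Python) =====
-- def get_code_by_position(row: int, col: int):
--     i = 1
--     while row > 1 or col > 1:
--         i += 1
--         if col == 1:
--             col = row - 1
--             row = 1
--         else:
--             row += 1
--             col -= 1
--     return i
-- ===== SOURCE B (Python) =====
-- def get_code_by_position(row: int, col: int):
--     # closed form: cell (row, col) lies on diagonal d = row + col - 1,
--     # preceded by d-1 full diagonals (a triangular number), and is the
--     # col-th cell on its diagonal.
--     d = row + col - 1
--     return d * (d - 1) // 2 + col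
-- ===== Notes on version B (the rewrite author's own statement) =====
-- stated objective: faster
-- what changed: Replaces the step-by-step diagonal walk (one loop iteration per visited cell) with the closed-form triangular-number formula d=row+col-1, index=d*(d-1)//2+col.
-- outside the precondition, e.g. on get_code_by_position(1, 0): A returns 1, B returns 0; on get_code_by_position(-1, 1): A returns 1, B returns 2; on get_code_by_position(-3, 2): A returns 2, B returns 5
import Mathlib
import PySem

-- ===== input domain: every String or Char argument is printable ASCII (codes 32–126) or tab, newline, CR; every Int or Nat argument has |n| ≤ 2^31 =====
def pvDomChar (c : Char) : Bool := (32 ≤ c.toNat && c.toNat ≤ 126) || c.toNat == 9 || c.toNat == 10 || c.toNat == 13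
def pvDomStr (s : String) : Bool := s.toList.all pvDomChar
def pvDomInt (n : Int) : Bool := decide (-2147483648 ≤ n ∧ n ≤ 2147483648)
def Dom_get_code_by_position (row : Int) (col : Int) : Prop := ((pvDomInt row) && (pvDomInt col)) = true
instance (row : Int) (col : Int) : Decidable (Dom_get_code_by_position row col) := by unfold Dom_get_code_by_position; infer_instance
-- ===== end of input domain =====

-- B replaces A's step-by-step diagonal walk with the O(1) closed-form
-- triangular-number formula; proved equal on the 1-based grid coordinates.


-- ===== PORT A =====
-- A's while loop, fuel-bounded to make it total in Lean; the fuel is large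
-- enough for every input admitted by Pre_ (proved in the lemmas below), so on
-- those inputs the port computes exactly what the Python loop computes.
def pyLoopA : Nat → Int → Int → Int → Int
  | 0, _, _, i => i
  | fuel + 1, row, col, i =>
    if row > 1 ∨ col > 1 then
      if col = 1 then pyLoopA fuel 1 (row - 1) (i + 1)
      else pyLoopA fuel (row + 1) (col - 1) (i + 1)
    else i

def get_code_by_position (row : Int) (col : Int) : Int :=
  pyLoopA ((row.natAbs + col.natAbs + 2) * (row.natAbs + col.natAbs + 2)) row col 1

-- ===== PORT B =====
def get_code_by_position_alt (row : Int) (col : Int) : Int :=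
  let d := row + col - 1
  PySem.Int.floordiv (d * (d - 1)) 2 + col

-- ===== PRECONDITION & SPEC =====
-- Pre_ keeps the inputs on which the walk stays a genuine diagonal enumeration
-- (col ≥ 1 and row + col ≥ 1); outside it A either diverges (col ≤ 0 with
-- row ≥ 2) or returns a leftover-loop-state corner value (1, or col) for
-- out-of-grid coordinates that no caller of this enumeration would specify.
def Pre_get_code_by_position (row : Int) (col : Int) : Prop := 1 ≤ col ∧ 1 ≤ row + col
instance (row : Int) (col : Int) : Decidable (Pre_get_code_by_position row col) := by
  unfold Pre_get_code_by_position; infer_instance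

def pvWitness_get_code_by_position : Int × Int := (3, 4)

def Spec_get_code_by_position (row : Int) (col : Int) (out : Int) : Prop := out = get_code_by_position_alt row col
instance (row : Int) (col : Int) (out : Int) : Decidable (Spec_get_code_by_position row col out) := by unfold Spec_get_code_by_position; infer_instance

-- ===== CLAIM (what is proved, stated in full; the proofs are below) =====
def Claim_equal_get_code_by_position : Prop := ∀ (row : Int) (col : Int), Dom_get_code_by_position row col → Pre_get_code_by_position row col → Spec_get_code_by_position row col (get_code_by_position row col)

-- ===== LEMMAS AND PROOFS =====

-- the closed form, written with Int's `/` (equal to floordiv for the positive divisor 2)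
def idx (row col : Int) : Int := ((row + col - 1) * (row + col - 2)) / 2 + col

theorem alt_eq_idx (row col : Int) : get_code_by_position_alt row col = idx row col := by
  simp only [get_code_by_position_alt, idx,
    PySem.Int.floordiv_eq_ediv_of_pos (by omega : (0:Int) < 2)]
  ring_nf

-- the product of two consecutive integers is non-negative
theorem consec_nonneg (m : Int) : 0 ≤ m * (m - 1) := by
  have h : -1 ≤ 4 * (m * (m - 1)) := by nlinarith [sq_nonneg (2 * m - 1)]
  omega

theorem idx_ge_two (row col : Int) (hc : 1 ≤ col) (hm : 1 ≤ row + col)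
    (h : row > 1 ∨ col > 1) : 2 ≤ idx row col := by
  unfold idx
  rcases lt_or_ge col 2 with hc2 | hc2
  · -- col = 1, so row ≥ 2 and the triangular part is ≥ 1
    have hcol : col = 1 := by omega
    have hrow : 2 ≤ row := by omega
    have h2 : 2 ≤ (row + col - 1) * (row + col - 2) := by nlinarith
    omega
  · have h0 := consec_nonneg (row + col - 1)
    have h0' : 0 ≤ (row + col - 1) * (row + col - 2) := by nlinarith [h0]
    omega

theorem idx_exit (row : Int) (h : row = 0 ∨ row = 1) : idx row 1 = 1 := by
  rcases h with h | h <;> subst h <;> decide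

theorem idx_step_right (row col : Int) (_hc : 2 ≤ col) :
    idx (row + 1) (col - 1) = idx row col - 1 := by
  unfold idx
  have : row + 1 + (col - 1) = row + col := by ring
  rw [this]; ring_nf

theorem idx_step_diag (row : Int) (_hr : 2 ≤ row) :
    idx 1 (row - 1) = idx row 1 - 1 := by
  unfold idx
  have h1 : (1 + (row - 1) - 1) * (1 + (row - 1) - 2) = (row - 1) * (row - 2) := by ring
  have h2 : (row + 1 - 1) * (row + 1 - 2) = (row - 1) * (row - 2) + 2 * (row - 1) := by ring
  rw [h1, h2]
  have := Int.add_mul_ediv_right ((row - 1) * (row - 2)) (row - 1) (by omega : (2:Int) ≠ 0)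
  omega

-- loop invariant: with enough fuel, the walk returns i - 1 + idx row col
theorem pyLoopA_eq (fuel : Nat) :
    ∀ (row col i : Int), 1 ≤ col → 1 ≤ row + col → idx row col ≤ (fuel : Int) + 1 →
      pyLoopA fuel row col i = i - 1 + idx row col := by
  induction fuel with
  | zero =>
    intro row col i hc hm hfuel
    by_cases hloop : row > 1 ∨ col > 1
    · exact absurd (idx_ge_two row col hc hm hloop) (by push_cast at hfuel; omega)
    · have hcol : col = 1 := by omega
      subst hcol
      simp only [pyLoopA]
      rw [idx_exit row (by omega)]
      omega
  | succ n ih =>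
    intro row col i hc hm hfuel
    by_cases hloop : row > 1 ∨ col > 1
    · by_cases hc1 : col = 1
      · subst hc1
        have hr2 : 2 ≤ row := by omega
        have hstep := idx_step_diag row hr2
        have := ih 1 (row - 1) (i + 1) (by omega) (by omega) (by push_cast at hfuel ⊢; omega)
        simp only [pyLoopA, if_pos hloop]
        rw [if_true, this]
        omega
      · have hc2 : 2 ≤ col := by omega
        have hstep := idx_step_right row col hc2
        have := ih (row + 1) (col - 1) (i + 1) (by omega) (by omega) (by push_cast at hfuel ⊢; omega)
        simp only [pyLoopA, if_pos hloop, if_neg hc1, this]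
        omega
    · have hcol : col = 1 := by omega
      subst hcol
      simp only [pyLoopA]
      rw [if_neg hloop, idx_exit row (by omega)]
      omega

theorem idx_le_fuel (row col : Int) (_hc : 1 ≤ col) (hm : 1 ≤ row + col) :
    idx row col ≤ (((row.natAbs + col.natAbs + 2) * (row.natAbs + col.natAbs + 2) : Nat) : Int) + 1 := by
  unfold idx
  push_cast
  have hr1 : row ≤ |row| := le_abs_self row
  have hr2 : -row ≤ |row| := neg_le_abs row
  have hc1 : col ≤ |col| := le_abs_self col
  have hc0 : (0:Int) ≤ |col| := abs_nonneg col
  have hr0 : (0:Int) ≤ |row| := abs_nonneg row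
  have hP0 := consec_nonneg (row + col - 1)
  have hP0' : 0 ≤ (row + col - 1) * (row + col - 2) := by nlinarith [hP0]
  have hdiv : ((row + col - 1) * (row + col - 2)) / 2 ≤ (row + col - 1) * (row + col - 2) :=
    Int.ediv_le_self _ hP0'
  have hmu : row + col - 1 ≤ |row| + |col| := by omega
  have hm0 : 0 ≤ row + col - 1 := by omega
  have hsq : (row + col - 1) * (row + col - 2) ≤ (|row| + |col|) * (|row| + |col|) := by nlinarith
  nlinarith

-- ===== VERDICT (by name: the statement is the Claim_ definition above) =====
theorem get_code_by_position_spec : Claim_equal_get_code_by_position := by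
  intro row col _ hpre
  obtain ⟨hr, hc⟩ := hpre
  unfold Spec_get_code_by_position get_code_by_position
  rw [alt_eq_idx, pyLoopA_eq _ row col 1 hr hc (idx_le_fuel row col hr hc)]
  ring
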